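-- pv_equiv track=rewrite | github.com/AustinBozgoz/Novel-Metrics-for-Analyzing-Extreme-Heat-Patterns-Across-US-Cities- | src/PDF_plotter.py | month_translator
-- ===== SOURCE A (Python) =====
-- def month_translator(months):#given start and end months, return 3 letter abrieviations, otherwise return the word annual
--     if months:
--         product=[0,0]
--         for i in range(2):
--             if months[i]==1:product[i]='jan'
--             if months[i]==2:product[i]='feb'
--             if months[i]==3:product[i]='mar'
--             if months[i]==4:product[i]='apr'
--             if months[i]==5:product[i]='may'
--             if months[i]==6:product[i]='jun'
--             if months[i]==7:product[i]='jul'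
--             if months[i]==8:product[i]='aug'
--             if months[i]==9:product[i]='sep'
--             if months[i]==10:product[i]='oct'
--             if months[i]==11:product[i]='nov'
--             if months[i]==12:product[i]='dec'
--         return product[0]+'-'+product[1]
--     else:
--         return 'annual'
-- ===== SOURCE B (Python) =====
-- # B: arithmetic slicing of one packed 36-char string instead of a 12-way if-chain.
-- def month_translator(months):
--     if not months:
--         return 'annual'
--     packed = 'janfebmaraprmayjunjulaugsepoctnovdec'
--     return '-'.join(packed[3 * m - 3:3 * m] for m in months[:2])
-- ===== Notes on version B (the rewrite author's own statement) =====
-- stated objective: simpler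
-- what changed: Replaced the 12-way if-chain filling a mutable two-slot list with arithmetic slicing of one packed 36-char month string, joining the two slices with '-'.
import Mathlib
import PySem

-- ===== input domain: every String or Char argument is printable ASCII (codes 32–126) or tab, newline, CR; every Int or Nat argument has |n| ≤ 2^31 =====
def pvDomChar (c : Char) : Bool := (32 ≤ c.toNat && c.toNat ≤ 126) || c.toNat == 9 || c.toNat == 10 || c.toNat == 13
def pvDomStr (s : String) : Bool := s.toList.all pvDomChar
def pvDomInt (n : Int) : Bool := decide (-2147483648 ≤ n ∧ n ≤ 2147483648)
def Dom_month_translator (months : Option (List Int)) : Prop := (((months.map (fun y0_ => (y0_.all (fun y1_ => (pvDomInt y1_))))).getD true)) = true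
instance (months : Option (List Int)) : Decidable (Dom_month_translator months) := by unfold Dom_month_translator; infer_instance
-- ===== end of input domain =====

-- B replaces A's 12-way if-chain over a mutable 2-slot list by arithmetic slicing of one packed
-- 36-character month string joined with '-' (objective: simpler).
-- Pre_ excludes inputs on which the Python A raises (IndexError for a nonempty list shorter
-- than 2, TypeError when months[0] or months[1] is outside 1..12, so the 0 sentinel reaches '+').

-- ===== PORT A =====
-- A's chain of 12 independent 'if' statements rewriting a cell that starts as the sentinel 0;
-- the int sentinel is represented as "" (A never returns it: such inputs raise, outside Pre_).
def pvCellA (m : Int) : String :=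
  let p : String := ""
  let p := if m == 1 then "jan" else p
  let p := if m == 2 then "feb" else p
  let p := if m == 3 then "mar" else p
  let p := if m == 4 then "apr" else p
  let p := if m == 5 then "may" else p
  let p := if m == 6 then "jun" else p
  let p := if m == 7 then "jul" else p
  let p := if m == 8 then "aug" else p
  let p := if m == 9 then "sep" else p
  let p := if m == 10 then "oct" else p
  let p := if m == 11 then "nov" else p
  let p := if m == 12 then "dec" else p
  p

def month_translator (months : Option (List Int)) : String :=
  match months with
  | none => "annual"
  | some xs =>
    if xs.isEmpty then "annual"
    else
      -- for i in range(2): the i-th cell, read via months[i] (none = IndexError, outside Pre_)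
      let p0 := pvCellA ((PySem.List.pyGet? xs 0).getD 0)
      let p1 := pvCellA ((PySem.List.pyGet? xs 1).getD 0)
      p0 ++ "-" ++ p1

-- ===== PORT B =====
def pvPacked : String := "janfebmaraprmayjunjulaugsepoctnovdec"

def month_translator_alt (months : Option (List Int)) : String :=
  match months with
  | none => "annual"
  | some xs =>
    if xs.isEmpty then "annual"
    else
      PySem.Str.join "-"
        ((PySem.List.slice xs (some 0) (some 2)).map
          (fun m => PySem.Str.slice pvPacked (some (3 * m - 3)) (some (3 * m))))

-- ===== PRECONDITION & SPEC =====
-- Pre_: A returns exactly on a falsy argument ('annual') and on lists of length ≥ 2 whose first two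
-- entries are months 1..12; elsewhere A raises (IndexError or TypeError).
def Pre_month_translator (months : Option (List Int)) : Prop :=
  months.getD [] = [] ∨ (2 ≤ (months.getD []).length ∧
      (∀ m ∈ (months.getD []).take 2, 1 ≤ m ∧ m ≤ 12))
instance (months : Option (List Int)) : Decidable (Pre_month_translator months) := by unfold Pre_month_translator; infer_instance
def pvWitness_month_translator : Option (List Int) := some [3, 9]

def Spec_month_translator (months : Option (List Int)) (out : String) : Prop := out = month_translator_alt months
instance (months : Option (List Int)) (out : String) : Decidable (Spec_month_translator months out) := by unfold Spec_month_translator; infer_instance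

-- ===== CLAIM =====
def Claim_equal_month_translator : Prop := ∀ (months : Option (List Int)), Dom_month_translator months → Pre_month_translator months → Spec_month_translator months (month_translator months)

-- ===== LEMMAS AND PROOFS =====
theorem pvJoin2 (s t : String) : PySem.Str.join "-" [s, t] = s ++ "-" ++ t := by
  apply String.toList_injective
  simp [PySem.Str.toList_join, PySem.Chars.join, List.intercalate, List.intersperse]

theorem pvCellA_eq_slice (m : Int) (h1 : 1 ≤ m) (h2 : m ≤ 12) :
    pvCellA m = PySem.Str.slice pvPacked (some (3 * m - 3)) (some (3 * m)) := by
  interval_cases m <;> decide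

-- ===== VERDICT =====
theorem month_translator_spec : Claim_equal_month_translator := by
  intro months _ hpre
  unfold Spec_month_translator month_translator month_translator_alt
  match months with
  | none => rfl
  | some xs =>
    simp only [Pre_month_translator, Option.getD_some] at hpre
    rcases hpre with rfl | ⟨hlen, hm⟩
    · rfl
    · match xs, hlen with
      | a :: b :: rest, _ =>
        have ha := hm a (by simp)
        have hb := hm b (by simp)
        have hsl : PySem.List.slice (a :: b :: rest) (some 0) (some 2) = [a, b] := by
          have := PySem.List.slice_natCast (xs := a :: b :: rest) (a := 0) (b := 2)
          simpa using this
        simp only [List.isEmpty_cons, if_false, Bool.false_eq_true, hsl, List.map,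
          PySem.List.pyGet?_zero_cons, Option.getD_some]
        have h1 : PySem.List.pyGet? (a :: b :: rest) 1 = some b :=
          PySem.List.pyGet?_ofNat (xs := a :: b :: rest) (n := 1) (by simp)
        rw [h1]
        simp only [Option.getD_some]
        rw [pvCellA_eq_slice a ha.1 ha.2, pvCellA_eq_slice b hb.1 hb.2, pvJoin2]
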